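-- pv_equiv track=rewrite | github.com/duck-master/domain-extractor | domain_extractor_experiment.py | make_domains_by_count_dict
-- ===== SOURCE A (Python) =====
-- def make_domains_by_count_dict(domain_counts):
--     """
--     Inverts the domain_counts dictionary
--
--     Input type {str: int}, interpreted as {domain: count}
--
--     Output type  {int: [str]}, interpreted as {count: [domain]}
--     """
--     # input validation
--     if not isinstance(domain_counts, dict):
--         raise TypeError("domain_counts should be a dict; got type {type(domain_counts)} instead")
--
--     # main loop
--     domains_by_popularity = {}
--     for domain, count in domain_counts.items():
--         if count in domains_by_popularity:
--             domains_by_popularity[count].append(domain)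
--         else:
--             domains_by_popularity[count] = [domain]
--
--     # sort items in result
--     for count in domains_by_popularity.keys():
--         domains_by_popularity[count].sort()
--
--     # return
--     return domains_by_popularity
-- ===== SOURCE B (Python) =====
-- def make_domains_by_count_dict(domain_counts):
--     """Invert {domain: count} into {count: sorted [domain]} in a single pass:
--     each domain is inserted into its count's bucket at its sorted position
--     (found by binary search), so no per-bucket sort pass is needed afterwards."""
--     if not isinstance(domain_counts, dict):
--         raise TypeError("domain_counts should be a dict; got type {type(domain_counts)} instead")
--     domains_by_popularity = {}
--     for domain, count in domain_counts.items():
--         bucket = domains_by_popularity.setdefault(count, [])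
--         lo, hi = 0, len(bucket)
--         while lo < hi:
--             mid = (lo + hi) // 2
--             if bucket[mid] < domain:
--                 lo = mid + 1
--             else:
--                 hi = mid
--         bucket.insert(lo, domain)
--     return domains_by_popularity
-- ===== Notes on version B (the rewrite author's own statement) =====
-- stated objective: alternative
-- what changed: Instead of grouping domains per count and then sorting every bucket in a second pass, B builds each bucket in one pass by binary-searching the insertion point and inserting every domain at its sorted position, so the final per-bucket sort pass disappears.
import Mathlib
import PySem

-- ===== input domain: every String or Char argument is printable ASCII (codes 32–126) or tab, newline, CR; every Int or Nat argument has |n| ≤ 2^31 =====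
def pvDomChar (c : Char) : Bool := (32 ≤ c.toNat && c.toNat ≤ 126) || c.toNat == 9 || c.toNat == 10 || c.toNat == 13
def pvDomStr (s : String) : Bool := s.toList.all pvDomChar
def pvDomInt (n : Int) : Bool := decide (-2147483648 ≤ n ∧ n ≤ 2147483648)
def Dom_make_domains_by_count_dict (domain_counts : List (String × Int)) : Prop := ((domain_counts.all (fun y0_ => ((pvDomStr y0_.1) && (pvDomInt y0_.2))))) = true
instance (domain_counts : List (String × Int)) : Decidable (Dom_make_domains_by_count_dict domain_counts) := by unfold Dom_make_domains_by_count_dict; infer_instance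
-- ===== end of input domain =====

-- B replaces A's group-then-sort-every-bucket scheme by a single pass that inserts each
-- domain at its sorted position (found by binary search) in its count's bucket
-- (objective: alternative decomposition; the final per-bucket sort pass disappears).

-- ===== PORT A =====
-- A: group domains by count (append, or create a singleton bucket), then a second
-- pass over the keys sorting each bucket in place.
def make_domains_by_count_dict (domain_counts : List (String × Int)) : List (Int × List String) :=
  -- the dict argument arrives as an association list; Dict.ofList reproduces Python dict construction
  let items := (PySem.Dict.ofList domain_counts).items
  -- for domain, count in domain_counts.items(): append or create
  let grouped := items.foldl
    (fun d p =>
      if d.contains p.2 then d.modify p.2 [] (fun l => l ++ [p.1])   -- d[count].append(domain)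
      else d.insert p.2 [p.1])                                       -- d[count] = [domain]
    PySem.Dict.empty
  -- for count in d.keys(): d[count].sort()
  let sortedD := grouped.keys.foldl
    (fun d k => d.modify k [] (fun l => PySem.List.sorted l (fun x => x) false)) grouped
  sortedD.items

-- ===== PORT B =====
-- the `while lo < hi` binary-search loop of Source B; bucket[mid] is always in range there,
-- so List.getD with a dummy default is exact
def pyBisectLoop (bucket : List String) (x : String) (lo hi : Nat) : Nat :=
  if _h : lo < hi then
    let mid := (lo + hi) / 2
    if (bucket.getD mid "") < x then pyBisectLoop bucket x (mid + 1) hi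
    else pyBisectLoop bucket x lo mid
  else lo
termination_by hi - lo
decreasing_by all_goals omega

def make_domains_by_count_dict_alt (domain_counts : List (String × Int)) : List (Int × List String) :=
  let items := (PySem.Dict.ofList domain_counts).items
  -- setdefault(count, []) followed by the in-place bucket.insert(lo, domain)
  -- is d[count] = insert-at-lo(d.get(count, []))
  (items.foldl
    (fun d p => d.modify p.2 []
      (fun bucket => PySem.List.insert bucket ((pyBisectLoop bucket p.1 0 bucket.length : Nat) : Int) p.1))
    PySem.Dict.empty).items

-- ===== PRECONDITION & SPEC =====
def Spec_make_domains_by_count_dict (domain_counts : List (String × Int)) (out : List (Int × List String)) : Prop := out = make_domains_by_count_dict_alt domain_counts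
instance (domain_counts : List (String × Int)) (out : List (Int × List String)) : Decidable (Spec_make_domains_by_count_dict domain_counts out) := by unfold Spec_make_domains_by_count_dict; infer_instance

-- ===== CLAIM (what is proved, stated in full; the proofs are below) =====
def Claim_equal_make_domains_by_count_dict : Prop := ∀ (domain_counts : List (String × Int)), Dom_make_domains_by_count_dict domain_counts → Spec_make_domains_by_count_dict domain_counts (make_domains_by_count_dict domain_counts)

-- ===== LEMMAS AND PROOFS =====

-- A's branching step is exactly `modify` (modify k d0 f is insert k (f (getD k d0)))
lemma stepA_eq_modify (d : PySem.Dict Int (List String)) (p : String × Int) :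
    (if d.contains p.2 then d.modify p.2 [] (fun l => l ++ [p.1]) else d.insert p.2 [p.1])
      = d.modify p.2 [] (fun l => l ++ [p.1]) := by
  by_cases h : d.contains p.2 = true
  · simp [h]
  · simp only [Bool.not_eq_true] at h
    simp only [h, if_neg Bool.false_ne_true]
    show d.insert p.2 [p.1] = d.insert p.2 ((d.getD p.2 []) ++ [p.1])
    rw [PySem.Dict.getD_of_not_contains d _ h]
    rfl

-- generic bucket characterisation of a modify-grouping fold keyed by the second component
lemma getD_groupFold (f : String → List String → List String)
    (l : List (String × Int)) (d : PySem.Dict Int (List String)) (c : Int) :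
    (l.foldl (fun d p => d.modify p.2 [] (fun v => f p.1 v)) d).getD c []
      = ((l.filter (fun p => p.2 == c)).map (·.1)).foldl (fun v x => f x v) (d.getD c []) := by
  induction l generalizing d with
  | nil => rfl
  | cons p l ih =>
      simp only [List.foldl_cons, ih, List.filter_cons]
      by_cases h : p.2 = c
      · subst h; simp [PySem.Dict.getD_modify_self]
      · have h' : (p.2 == c) = false := by simp [h]
        rw [PySem.Dict.getD_modify_of_ne d [] _ (Ne.symm h), h']
        simp

lemma foldl_append_singleton (l acc : List String) :
    l.foldl (fun v x => v ++ [x]) acc = acc ++ l := by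
  induction l generalizing acc with
  | nil => simp
  | cons x l ih => simp [ih]

-- the binary-search loop: everything strictly left of the result is < x,
-- everything from the result on is ≥ x, and the result is within bounds
lemma pyBisectLoop_spec (b : List String) (x : String) (lo hi : Nat)
    (hhi : hi ≤ b.length) (hlo : lo ≤ hi)
    (hsorted : b.Pairwise (· ≤ ·))
    (hleft : ∀ j (hj : j < b.length), j < lo → b[j] < x)
    (hright : ∀ j (hj : j < b.length), hi ≤ j → x ≤ b[j]) :
    pyBisectLoop b x lo hi ≤ b.length ∧
    (∀ j (hj : j < b.length), j < pyBisectLoop b x lo hi → b[j] < x) ∧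
    (∀ j (hj : j < b.length), pyBisectLoop b x lo hi ≤ j → x ≤ b[j]) := by
  fun_induction pyBisectLoop b x lo hi with
  | case1 lo hi h mid hm ih =>
      refine ih (by omega) (by omega) ?_ hright
      intro j hj hmj
      have hmlt : mid < b.length := by omega
      rw [List.getD_eq_getElem b "" hmlt] at hm
      by_cases h1 : j = mid
      · exact h1 ▸ hm
      · have hjm : j < mid := by omega
        exact lt_of_le_of_lt (List.pairwise_iff_getElem.mp hsorted j mid hj hmlt hjm) hm
  | case2 lo hi h mid hm ih =>
      refine ih (by omega) (by omega) hleft ?_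
      intro j hj hmj
      have hmlt : mid < b.length := by omega
      rw [List.getD_eq_getElem b "" hmlt] at hm
      have hxm : x ≤ b[mid] := le_of_not_gt hm
      by_cases h1 : j = mid
      · exact h1 ▸ hxm
      · exact le_trans hxm (List.pairwise_iff_getElem.mp hsorted mid j hmlt hj (by omega))
  | case3 lo hi h =>
      exact ⟨by omega, fun j hj hjlo => hleft j hj hjlo,
        fun j hj hloj => hright j hj (by omega)⟩

-- insertion at the bisect position, as Source B performs it
def binInsert (bucket : List String) (x : String) : List String :=
  PySem.List.insert bucket ((pyBisectLoop bucket x 0 bucket.length : Nat) : Int) x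

lemma binInsert_take_drop (b : List String) (x : String) (hs : b.Pairwise (· ≤ ·)) :
    binInsert b x = b.take (pyBisectLoop b x 0 b.length) ++ x :: b.drop (pyBisectLoop b x 0 b.length) := by
  have hspec := pyBisectLoop_spec b x 0 b.length le_rfl (Nat.zero_le _) hs
    (by intro j hj hj0; omega) (by intro j hj hge; omega)
  exact PySem.List.insert_natCast b _ x hspec.1

lemma binInsert_perm (b : List String) (x : String) (hs : b.Pairwise (· ≤ ·)) :
    (binInsert b x).Perm (x :: b) := by
  rw [binInsert_take_drop b x hs]
  calc (b.take _ ++ x :: b.drop _).Perm (x :: (b.take _ ++ b.drop _)) := List.perm_middle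
    _ = x :: b := by rw [List.take_append_drop]

lemma binInsert_pairwise (b : List String) (x : String) (hs : b.Pairwise (· ≤ ·)) :
    (binInsert b x).Pairwise (· ≤ ·) := by
  have hspec := pyBisectLoop_spec b x 0 b.length le_rfl (Nat.zero_le _) hs
    (by intro j hj hj0; omega) (by intro j hj hge; omega)
  set r := pyBisectLoop b x 0 b.length with hr
  rw [binInsert_take_drop b x hs]
  rw [List.pairwise_append]
  refine ⟨List.Pairwise.sublist (List.take_sublist _ _) hs, ?_, ?_⟩
  · refine List.pairwise_cons.mpr ⟨?_, List.Pairwise.sublist (List.drop_sublist _ _) hs⟩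
    intro a ha
    rcases List.mem_iff_getElem.mp ha with ⟨i, hi, rfl⟩
    have hrlen : r ≤ b.length := hspec.1
    have hilen : i < b.length - r := by simpa using hi
    rw [List.getElem_drop]
    exact hspec.2.2 (r + i) (by omega) (by omega)
  · intro a ha c hc
    rcases List.mem_iff_getElem.mp ha with ⟨i, hi, rfl⟩
    have hi2 : i < r ∧ i < b.length := by simpa using hi
    have halt : (b.take r)[i] < x := by
      rw [List.getElem_take]; exact hspec.2.1 i hi2.2 hi2.1
    rcases List.mem_cons.mp hc with rfl | hc'
    · exact le_of_lt halt
    · rcases List.mem_iff_getElem.mp hc' with ⟨j, hj, rfl⟩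
      have hrlen : r ≤ b.length := hspec.1
      have hjlen : j < b.length - r := by simpa using hj
      rw [List.getElem_drop]
      exact le_of_lt (lt_of_lt_of_le halt (hspec.2.2 (r + j) (by omega) (by omega)))

lemma foldl_binInsert_perm (ws acc : List String) (hs : acc.Pairwise (· ≤ ·)) :
    (ws.foldl (fun a x => binInsert a x) acc).Perm (acc ++ ws) := by
  induction ws generalizing acc with
  | nil => simp
  | cons x ws ih =>
      refine (ih (binInsert acc x) (binInsert_pairwise acc x hs)).trans ?_
      refine (List.Perm.append_right ws (binInsert_perm acc x hs)).trans ?_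
      exact List.perm_middle.symm

lemma foldl_binInsert_pairwise (ws acc : List String) (h : acc.Pairwise (· ≤ ·)) :
    (ws.foldl (fun a x => binInsert a x) acc).Pairwise (· ≤ ·) := by
  induction ws generalizing acc with
  | nil => simpa using h
  | cons x ws ih => exact ih _ (binInsert_pairwise acc x h)

lemma foldl_binInsert_eq_sorted (ws : List String) :
    ws.foldl (fun a x => binInsert a x) [] = PySem.List.sorted ws (fun x => x) false := by
  refine (PySem.List.sorted_id_eq_of_perm_of_pairwise ws _ ?_ ?_).symm
  · simpa using foldl_binInsert_perm ws [] (by simp)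
  · exact foldl_binInsert_pairwise ws [] (by simp)

-- second pass of A: buckets of keys visited become sorted, others untouched
lemma getD_sortPass (ks : List Int) (d : PySem.Dict Int (List String)) (c : Int) :
    (ks.foldl (fun d k => d.modify k [] (fun l => PySem.List.sorted l (fun x => x) false)) d).getD c []
      = if c ∈ ks then PySem.List.sorted (d.getD c []) (fun x => x) false else d.getD c [] := by
  induction ks generalizing d with
  | nil => simp
  | cons k ks ih =>
      simp only [List.foldl_cons, ih, List.mem_cons]
      by_cases h : c = k
      · subst h
        rw [PySem.Dict.getD_modify_self]
        by_cases hmem : c ∈ ks <;> simp [hmem, PySem.List.sorted_sorted]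
      · rw [PySem.Dict.getD_modify_of_ne d [] _ h]
        by_cases hmem : c ∈ ks <;> simp [hmem, h]

theorem ports_eq (domain_counts : List (String × Int)) :
    make_domains_by_count_dict domain_counts = make_domains_by_count_dict_alt domain_counts := by
  unfold make_domains_by_count_dict make_domains_by_count_dict_alt
  simp only [stepA_eq_modify]
  set l := (PySem.Dict.ofList domain_counts).items with hl
  set gA := l.foldl (fun d p => d.modify p.2 [] (fun v => v ++ [p.1])) PySem.Dict.empty with hgA
  set gB := l.foldl
    (fun d p => d.modify p.2 []
      (fun bucket => PySem.List.insert bucket ((pyBisectLoop bucket p.1 0 bucket.length : Nat) : Int) p.1))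
    PySem.Dict.empty with hgB
  set fA := gA.keys.foldl (fun d k => d.modify k [] (fun v => PySem.List.sorted v (fun x => x) false)) gA with hfA
  -- keys of the two grouping folds agree
  have hkA : gA.keys = PySem.Set.update [] (l.map (·.2)) := by
    rw [hgA, PySem.Dict.keys_foldl_modify_key l (·.2) [] (fun _ p => (fun v => v ++ [p.1])), PySem.Dict.keys_empty]
  have hkB : gB.keys = PySem.Set.update [] (l.map (·.2)) := by
    rw [hgB, PySem.Dict.keys_foldl_modify_key l (·.2) []
        (fun _ p => (fun bucket => PySem.List.insert bucket ((pyBisectLoop bucket p.1 0 bucket.length : Nat) : Int) p.1)),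
        PySem.Dict.keys_empty]
  have hkAB : gA.keys = gB.keys := hkA.trans hkB.symm
  have hndA : gA.keys.Nodup := by
    rw [hgA]
    exact PySem.Dict.nodup_keys_foldl_modify_key l (·.2) [] _ _ (by rw [PySem.Dict.keys_empty]; exact List.nodup_nil)
  have hndB : gB.keys.Nodup := hkAB ▸ hndA
  have hndfA : fA.keys.Nodup := by
    rw [hfA]
    exact PySem.Dict.nodup_keys_foldl_modify_key gA.keys id [] _ _ hndA
  -- the sorting pass leaves the key list unchanged
  have hkfA : fA.keys = gA.keys := by
    rw [hfA, PySem.Dict.keys_foldl_modify gA.keys [] (fun _ _ => (fun v => PySem.List.sorted v (fun x => x) false)),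
        PySem.Set.update_eq_append_filter, PySem.Set.ofList_eq_self_of_nodup _ hndA]
    have : List.filter (fun y => !PySem.Set.contains gA.keys y) gA.keys = [] := by
      rw [List.filter_eq_nil_iff]
      intro a ha
      simp [PySem.Set.contains, ha]
    rw [this, List.append_nil]
  -- bucket of count c after grouping: domains whose count is c, in input order
  have hbA : ∀ c : Int, gA.getD c [] = (l.filter (fun p => p.2 == c)).map (·.1) := by
    intro c
    rw [hgA, getD_groupFold (fun x v => v ++ [x]) l PySem.Dict.empty c, PySem.Dict.getD_empty]
    exact foldl_append_singleton _ []
  have hbB : ∀ c : Int, gB.getD c [] = PySem.List.sorted ((l.filter (fun p => p.2 == c)).map (·.1)) (fun x => x) false := by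
    intro c
    rw [hgB, getD_groupFold
          (fun x bucket => PySem.List.insert bucket ((pyBisectLoop bucket x 0 bucket.length : Nat) : Int) x)
          l PySem.Dict.empty c, PySem.Dict.getD_empty]
    simpa only [binInsert] using foldl_binInsert_eq_sorted ((l.filter (fun p => p.2 == c)).map (·.1))
  -- assemble the items lists
  rw [PySem.Dict.items_eq_map_keys fA hndfA [], PySem.Dict.items_eq_map_keys gB hndB [], hkfA, hkAB]
  refine List.map_congr_left ?_
  intro k hk
  have hgetfA : fA.getD k [] = PySem.List.sorted (gA.getD k []) (fun x => x) false := by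
    rw [hfA, getD_sortPass gA.keys gA k, if_pos (hkAB ▸ hk)]
  rw [hgetfA, hbA k, hbB k]

-- ===== VERDICT (by name: the statement is the Claim_ definition above) =====
theorem make_domains_by_count_dict_spec : Claim_equal_make_domains_by_count_dict := by
  intro domain_counts _
  exact ports_eq domain_counts
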